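-- pv_equiv track=rewrite | github.com/yordanh/disentanglement_experiments | src/preprocess_dsprites.py | revise_latent_spec
-- ===== SOURCE A (Python) =====
-- def revise_latent_spec(latent_spec, label, mappings):
--
-- 	mappings_keys = mappings.keys()
--
-- 	for key in label:
-- 		for mkey in mappings_keys:
-- 			if key in mappings[mkey].keys():
-- 				new_value = mappings[mkey][key]
-- 				latent_spec[mkey] = [new_value]
-- 				break
--
-- 	return latent_spec
-- ===== SOURCE B (Python) =====
-- def revise_latent_spec(latent_spec, label, mappings):
-- 	# Build a reverse index key -> (mkey, value), keeping the first mkey that carries each key.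
-- 	index = {}
-- 	for mkey, inner in mappings.items():
-- 		for k, v in inner.items():
-- 			if k not in index:
-- 				index[k] = (mkey, v)
-- 	for key in label:
-- 		if key in index:
-- 			mkey, v = index[key]
-- 			latent_spec[mkey] = [v]
-- 	return latent_spec
-- ===== Notes on version B (the rewrite author's own statement) =====
-- stated objective: faster
-- what changed: A scans all of mappings for every label key (and re-fetches mappings[mkey] per probe); B builds a reverse index key->(mkey,value) once, keeping the first mkey carrying each key, then does one dict lookup per label key.
import Mathlib
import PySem

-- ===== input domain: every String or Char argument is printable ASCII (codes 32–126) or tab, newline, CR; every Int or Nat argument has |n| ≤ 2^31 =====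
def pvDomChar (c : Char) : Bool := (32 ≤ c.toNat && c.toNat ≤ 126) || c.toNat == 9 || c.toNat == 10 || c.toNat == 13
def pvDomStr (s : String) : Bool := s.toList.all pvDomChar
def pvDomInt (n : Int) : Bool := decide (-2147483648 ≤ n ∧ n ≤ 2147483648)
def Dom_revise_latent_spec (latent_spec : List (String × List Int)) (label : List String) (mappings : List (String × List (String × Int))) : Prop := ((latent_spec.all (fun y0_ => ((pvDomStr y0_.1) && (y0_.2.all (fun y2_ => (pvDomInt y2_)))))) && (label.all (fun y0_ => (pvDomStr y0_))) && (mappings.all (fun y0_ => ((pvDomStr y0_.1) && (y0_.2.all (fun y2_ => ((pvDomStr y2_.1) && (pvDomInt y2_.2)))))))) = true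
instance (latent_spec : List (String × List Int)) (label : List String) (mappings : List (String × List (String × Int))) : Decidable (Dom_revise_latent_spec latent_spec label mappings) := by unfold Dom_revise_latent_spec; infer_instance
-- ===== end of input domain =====

-- B replaces A's per-label scan over all mappings by a reverse index built once (key -> first (mkey, value)),
-- giving one dictionary lookup per label instead of a scan; both A and B mutate latent_spec in place identically
-- in Python, and the equivalence proved here is about the returned dict (= that same mutated dict).

-- ===== PORT A =====
-- inner 'for mkey in mappings_keys: … break' loop of A
def pvScanA (key : String) (mdict : PySem.Dict String (PySem.Dict String Int))
    (d : PySem.Dict String (List Int)) : List String → PySem.Dict String (List Int)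
  | [] => d
  | mkey :: rest =>
    let inner := mdict.getD mkey PySem.Dict.empty   -- mappings[mkey]; mkey comes from mappings.keys(), so always present
    if inner.contains key then d.insert mkey [inner.getD key 0]
    else pvScanA key mdict d rest

def revise_latent_spec (latent_spec : List (String × List Int)) (label : List String) (mappings : List (String × List (String × Int))) : List (String × List Int) :=
  let mdict : PySem.Dict String (PySem.Dict String Int) :=
    PySem.Dict.ofList (mappings.map (fun p => (p.1, PySem.Dict.ofList p.2)))
  let mappings_keys := mdict.keys
  (label.foldl (fun d key => pvScanA key mdict d mappings_keys) (PySem.Dict.ofList latent_spec)).items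

-- ===== PORT B =====
def revise_latent_spec_alt (latent_spec : List (String × List Int)) (label : List String) (mappings : List (String × List (String × Int))) : List (String × List Int) :=
  let mdict : PySem.Dict String (PySem.Dict String Int) :=
    PySem.Dict.ofList (mappings.map (fun p => (p.1, PySem.Dict.ofList p.2)))
  -- index = {}; for mkey, inner in mappings.items(): for k, v in inner.items(): if k not in index: index[k] = (mkey, v)
  let index : PySem.Dict String (String × Int) :=
    mdict.items.foldl (fun idx p =>
      p.2.items.foldl (fun idx kv =>
        if idx.contains kv.1 then idx else idx.insert kv.1 (p.1, kv.2)) idx)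
      PySem.Dict.empty
  (label.foldl (fun d key =>
      match index.get? key with
      | some mv => d.insert mv.1 [mv.2]
      | none => d) (PySem.Dict.ofList latent_spec)).items

-- ===== PRECONDITION & SPEC =====
def Spec_revise_latent_spec (latent_spec : List (String × List Int)) (label : List String) (mappings : List (String × List (String × Int))) (out : List (String × List Int)) : Prop := out = revise_latent_spec_alt latent_spec label mappings
instance (latent_spec : List (String × List Int)) (label : List String) (mappings : List (String × List (String × Int))) (out : List (String × List Int)) : Decidable (Spec_revise_latent_spec latent_spec label mappings out) := by unfold Spec_revise_latent_spec; infer_instance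

-- ===== CLAIM (what is proved, stated in full; the proofs are below) =====
def Claim_equal_revise_latent_spec : Prop := ∀ (latent_spec : List (String × List Int)) (label : List String) (mappings : List (String × List (String × Int))), Dom_revise_latent_spec latent_spec label mappings → Spec_revise_latent_spec latent_spec label mappings (revise_latent_spec latent_spec label mappings)

-- ===== LEMMAS AND PROOFS =====

-- the first (mkey, value) hit for `key` when scanning the mappings in order
def pvFind (key : String) : List (String × PySem.Dict String Int) → Option (String × Int)
  | [] => none
  | (mkey, inner) :: rest =>
    match inner.get? key with
    | some v => some (mkey, v)
    | none => pvFind key rest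

theorem pvInnerFold (key mkey : String) (ps : List (String × Int)) (idx : PySem.Dict String (String × Int)) :
    (ps.foldl (fun idx kv => if idx.contains kv.1 then idx else idx.insert kv.1 (mkey, kv.2)) idx).get? key
      = match idx.get? key with
        | some r => some r
        | none => ((PySem.Dict.mk ps).get? key).map (fun v => (mkey, v)) := by
  induction ps generalizing idx with
  | nil =>
    have h0 : (PySem.Dict.mk ([] : List (String × Int))).get? key = none := rfl
    cases h : idx.get? key <;> simp [h, h0]
  | cons kv rest ih =>
    obtain ⟨k, v⟩ := kv
    simp only [List.foldl]
    by_cases hc : idx.contains k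
    · rw [if_pos hc, ih]
      cases h : idx.get? key with
      | some r => simp
      | none =>
        have hne : (k == key) = false := by
          by_contra hkk
          have : k = key := by
            cases hkk' : (k == key) <;> simp_all
          subst this
          rw [PySem.Dict.contains_eq_isSome_get?, h] at hc
          simp at hc
        simp [PySem.Dict.get?_mk_cons, hne]
    · rw [if_neg hc, ih]
      rw [PySem.Dict.get?_insert]
      by_cases hk : key = k
      · subst hk
        have h0 : idx.get? key = none := by
          rw [PySem.Dict.contains_eq_isSome_get?] at hc
          cases h : idx.get? key <;> simp [h] at hc ⊢
        simp [h0, PySem.Dict.get?_mk_cons]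
      · have hne : (k == key) = false := by simp; exact fun h => absurd h.symm hk
        simp only [if_neg hk]
        cases h : idx.get? key <;> simp only [h, PySem.Dict.get?_mk_cons, hne, Bool.false_eq_true, ↓reduceIte]

theorem pvDict_mk_items (d : PySem.Dict String Int) : PySem.Dict.mk d.items = d := by
  cases d; rfl

theorem pvOuterFold (key : String) (L : List (String × PySem.Dict String Int)) (idx : PySem.Dict String (String × Int)) :
    (L.foldl (fun idx p =>
        p.2.items.foldl (fun idx kv =>
          if idx.contains kv.1 then idx else idx.insert kv.1 (p.1, kv.2)) idx) idx).get? key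
      = match idx.get? key with
        | some r => some r
        | none => pvFind key L := by
  induction L generalizing idx with
  | nil => cases h : idx.get? key <;> simp [pvFind, h]
  | cons p rest ih =>
    obtain ⟨mkey, inner⟩ := p
    simp only [List.foldl]
    rw [ih, pvInnerFold key mkey inner.items idx, pvDict_mk_items]
    cases h : idx.get? key with
    | some r => simp
    | none =>
      simp only [pvFind]
      cases hi : inner.get? key <;> simp

theorem pvScanA_eq (L : List (String × PySem.Dict String Int))
    (mdict : PySem.Dict String (PySem.Dict String Int))
    (h : ∀ p ∈ L, mdict.getD p.1 PySem.Dict.empty = p.2)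
    (d : PySem.Dict String (List Int)) (key : String) :
    pvScanA key mdict d (L.map (·.1))
      = match pvFind key L with
        | some mv => d.insert mv.1 [mv.2]
        | none => d := by
  induction L with
  | nil => simp [pvScanA, pvFind]
  | cons p rest ih =>
    obtain ⟨mkey, inner⟩ := p
    have hinner : mdict.getD mkey PySem.Dict.empty = inner := h (mkey, inner) (by simp)
    simp only [List.map, pvScanA, pvFind, hinner]
    cases hg : inner.get? key with
    | some v =>
      have hc : inner.contains key = true := by
        rw [PySem.Dict.contains_eq_isSome_get?, hg]; rfl
      rw [if_pos hc]
      simp [PySem.Dict.getD_eq_get?_getD, hg]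
    | none =>
      have hc : inner.contains key = false := by
        rw [PySem.Dict.contains_eq_isSome_get?, hg]; rfl
      rw [if_neg (by simp [hc])]
      exact ih (fun q hq => h q (List.mem_cons_of_mem _ hq))

-- ===== VERDICT (by name: the statement is the Claim_ definition above) =====
theorem revise_latent_spec_spec : Claim_equal_revise_latent_spec := by
  intro latent_spec label mappings _
  unfold Spec_revise_latent_spec revise_latent_spec revise_latent_spec_alt
  dsimp only
  refine congrArg PySem.Dict.items ?_
  apply PySem.List.foldl_congr_mem
  intro d key _
  have hnd : (PySem.Dict.ofList (mappings.map (fun p => (p.1, PySem.Dict.ofList p.2)))).keys.Nodup :=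
    PySem.Dict.nodup_keys_ofList _
  have hh : ∀ p ∈ (PySem.Dict.ofList (mappings.map (fun p => (p.1, PySem.Dict.ofList p.2)))).items,
      (PySem.Dict.ofList (mappings.map (fun p => (p.1, PySem.Dict.ofList p.2)))).getD p.1 PySem.Dict.empty = p.2 := by
    rintro ⟨k, v⟩ hp
    exact PySem.Dict.getD_of_mem_items _ hp hnd _
  rw [show (PySem.Dict.ofList (mappings.map (fun p => (p.1, PySem.Dict.ofList p.2)))).keys
        = (PySem.Dict.ofList (mappings.map (fun p => (p.1, PySem.Dict.ofList p.2)))).items.map (·.1) from rfl]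
  rw [pvScanA_eq _ _ hh d key, pvOuterFold]
  simp [PySem.Dict.get?_empty]
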